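-- pv_equiv track=rewrite | github.com/btc-c0der/omega-btc-ai | divine_dashboard_v3/components/divine_book/micro_modules/resonance_detector.py | closest_fibonacci
-- ===== SOURCE A (Python) =====
-- FIBONACCI_SEQUENCE = [1, 1, 2, 3, 5, 8, 13, 21, 34, 55, 89, 144]
--
-- def closest_fibonacci(n: int) -> int:
--     """
--     Find the closest Fibonacci number to the given number.
--
--     Args:
--         n: The number to find the closest Fibonacci number for
--
--     Returns:
--         The closest Fibonacci number
--     """
--     if n <= 0:
--         return 1
--
--     # Extend Fibonacci sequence if necessary
--     fib_seq = FIBONACCI_SEQUENCE.copy()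
--     while fib_seq[-1] < n * 2:
--         fib_seq.append(fib_seq[-1] + fib_seq[-2])
--
--     # Find closest
--     closest = fib_seq[0]
--     min_diff = abs(n - closest)
--
--     for fib in fib_seq:
--         diff = abs(n - fib)
--         if diff < min_diff:
--             min_diff = diff
--             closest = fib
--
--     return closest
-- ===== SOURCE B (Python) =====
-- def closest_fibonacci(n: int) -> int:
--     # Bracket n between two consecutive Fibonacci numbers a <= n <= b,
--     # then pick the nearer one (the smaller on a tie, as the original does).
--     if n <= 0:
--         return 1
--     a, b = 1, 1
--     while b < n:
--         a, b = b, a + b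
--     return a if n - a <= b - n else b
-- ===== Notes on version B (the rewrite author's own statement) =====
-- stated objective: simpler
-- what changed: Replaces the precomputed list, its while-loop extension past 2n and the full linear min-scan by a single two-variable Fibonacci iteration that brackets n between consecutive Fibonacci numbers and compares the two neighbors.
import Mathlib
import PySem

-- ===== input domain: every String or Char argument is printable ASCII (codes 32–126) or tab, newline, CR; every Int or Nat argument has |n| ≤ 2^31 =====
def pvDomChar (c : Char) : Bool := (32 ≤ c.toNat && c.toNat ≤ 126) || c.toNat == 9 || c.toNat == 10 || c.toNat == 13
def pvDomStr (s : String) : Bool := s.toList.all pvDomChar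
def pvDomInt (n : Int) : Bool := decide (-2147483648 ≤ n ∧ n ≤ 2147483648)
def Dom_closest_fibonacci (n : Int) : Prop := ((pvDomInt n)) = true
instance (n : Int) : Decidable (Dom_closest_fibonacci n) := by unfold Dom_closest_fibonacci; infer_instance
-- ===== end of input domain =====

-- ===== PORT A =====
-- B replaces A's precomputed list + 2n extension + full min-scan by a two-variable
-- Fibonacci bracket iteration; proved equal on all of Dom (A is total there).

-- fib_seq[-1] / fib_seq[-2] (list always has ≥ 12 elements, so .getD 0 is never taken)
def pvLast (l : List Int) : Int := (PySem.List.pyGet? l (-1)).getD 0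
def pvLast2 (l : List Int) : Int := (PySem.List.pyGet? l (-2)).getD 0

-- the 'while fib_seq[-1] < n * 2: fib_seq.append(...)' loop; fuel 100 always suffices on Dom
def extendFib (n : Int) : Nat → List Int → List Int
  | 0, l => l
  | fuel + 1, l =>
    if pvLast l < n * 2 then extendFib n fuel (l ++ [pvLast l + pvLast2 l])
    else l

-- one step of the 'for fib in fib_seq' min-scan
def scanStep (n : Int) (cd : Int × Int) (fib : Int) : Int × Int :=
  if |n - fib| < cd.2 then (fib, |n - fib|) else cd

def closest_fibonacci (n : Int) : Int :=
  if n ≤ 0 then 1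
  else
    let fib_seq := extendFib n 100 [1, 1, 2, 3, 5, 8, 13, 21, 34, 55, 89, 144]
    let closest := (PySem.List.pyGet? fib_seq 0).getD 0
    let min_diff := |n - closest|
    (fib_seq.foldl (scanStep n) (closest, min_diff)).1

-- ===== PORT B =====
-- the 'while b < n: a, b = b, a + b' loop; fuel 100 always suffices on Dom
def bracket (n : Int) : Nat → Int → Int → Int × Int
  | 0, a, b => (a, b)
  | fuel + 1, a, b => if b < n then bracket n fuel b (a + b) else (a, b)

def closest_fibonacci_alt (n : Int) : Int :=
  if n ≤ 0 then 1
  else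
    let ab := bracket n 100 1 1
    if n - ab.1 ≤ ab.2 - n then ab.1 else ab.2

-- ===== PRECONDITION & SPEC =====
def Spec_closest_fibonacci (n : Int) (out : Int) : Prop := out = closest_fibonacci_alt n
instance (n : Int) (out : Int) : Decidable (Spec_closest_fibonacci n out) := by unfold Spec_closest_fibonacci; infer_instance

-- ===== CLAIM (what is proved, stated in full; the proofs are below) =====
def Claim_equal_closest_fibonacci : Prop := ∀ (n : Int), Dom_closest_fibonacci n → Spec_closest_fibonacci n (closest_fibonacci n)

-- ===== LEMMAS AND PROOFS =====

-- Fibonacci numbers via a linear pair recursion: fI 0 = 0, fI 1 = 1, fI 2 = 1, …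
def fp : Nat → Int × Int
  | 0 => (0, 1)
  | k + 1 => ((fp k).2, (fp k).1 + (fp k).2)

def fI (k : Nat) : Int := (fp k).1

-- the list [fI 1, …, fI m]
def fibs : Nat → List Int
  | 0 => []
  | m + 1 => fibs m ++ [fI (m + 1)]

theorem fI_add_two (k : Nat) : fI (k + 2) = fI k + fI (k + 1) := rfl

theorem fp_bounds (k : Nat) : 0 ≤ (fp k).1 ∧ 1 ≤ (fp k).2 := by
  induction k with
  | zero => simp [fp]
  | succ k ih => simp only [fp]; omega

theorem fI_pos {k : Nat} (h : 1 ≤ k) : 1 ≤ fI k := by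
  obtain ⟨j, rfl⟩ := Nat.exists_eq_add_of_le h
  have := fp_bounds j
  simp only [fI, Nat.add_comm 1 j, fp]
  omega

theorem fI_lt_succ {k : Nat} (h : 2 ≤ k) : fI k < fI (k + 1) := by
  obtain ⟨j, rfl⟩ := Nat.exists_eq_add_of_le h
  have h1 : fI (2 + j) = fI j + fI (j + 1) := by rw [Nat.add_comm 2 j]; exact fI_add_two j
  have h2 : fI (2 + j + 1) = fI (j + 1) + fI (j + 2) := by
    have : 2 + j + 1 = (j + 1) + 2 := by omega
    rw [this]; exact fI_add_two (j + 1)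
  have h3 : 1 ≤ fI (j + 1) := fI_pos (by omega)
  have h4 : fI (j + 2) = fI j + fI (j + 1) := fI_add_two j
  omega

theorem fI_le_succ {k : Nat} (h : 1 ≤ k) : fI k ≤ fI (k + 1) := by
  rcases Nat.lt_or_ge k 2 with h2 | h2
  · have : k = 1 := by omega
    subst this; decide
  · exact le_of_lt (fI_lt_succ h2)

theorem fI_mono {j k : Nat} (h1 : 1 ≤ j) (h : j ≤ k) : fI j ≤ fI k := by
  induction k with
  | zero => omega
  | succ k ih =>
    rcases Nat.lt_or_ge j (k + 1) with hlt | hge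
    · exact le_trans (ih (by omega)) (fI_le_succ (by omega))
    · have : j = k + 1 := by omega
      subst this; rfl

theorem fI_strict {j k : Nat} (h1 : 2 ≤ j) (h : j < k) : fI j < fI k := by
  exact lt_of_lt_of_le (fI_lt_succ h1) (fI_mono (by omega) h)

theorem fibs_length (m : Nat) : (fibs m).length = m := by
  induction m with
  | zero => rfl
  | succ m ih => simp [fibs, ih]

theorem fibs_twelve : fibs 12 = [1, 1, 2, 3, 5, 8, 13, 21, 34, 55, 89, 144] := by decide

theorem pvLast_fibs (m : Nat) : pvLast (fibs (m + 1)) = fI (m + 1) := by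
  simp [pvLast, fibs, PySem.List.pyGet?_neg_one_append_singleton]

theorem pvLast2_fibs (m : Nat) : pvLast2 (fibs (m + 2)) = fI (m + 1) := by
  have hlen : (fibs (m + 2)).length = m + 2 := fibs_length _
  rw [pvLast2, PySem.List.pyGet?_neg_ofNat _ 2 (by omega) (by omega), hlen]
  show ((fibs (m + 1) ++ [fI (m + 2)])[m]?).getD 0 = fI (m + 1)
  rw [List.getElem?_append_left (by rw [fibs_length]; omega)]
  have hc : (fibs m ++ [fI (m + 1)])[(m : Nat)]? = some (fI (m + 1)) := by
    rw [List.getElem?_append_right (by rw [fibs_length])]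
    simp [fibs_length]
  rw [fibs, hc]
  rfl

theorem fibs_head (m : Nat) (h : 1 ≤ m) : PySem.List.pyGet? (fibs m) 0 = some 1 := by
  induction m with
  | zero => omega
  | succ m ih =>
    rcases Nat.eq_zero_or_pos m with rfl | hm
    · decide
    · rw [fibs, PySem.List.pyGet?_zero, List.getElem?_append_left (by rw [fibs_length]; omega),
        ← PySem.List.pyGet?_zero, ih hm]

theorem extend_spec (n : Int) :
    ∀ (fuel m : Nat), 2 ≤ m → n * 2 ≤ fI (m + fuel) →
      ∃ M, m ≤ M ∧ extendFib n fuel (fibs m) = fibs M ∧ n * 2 ≤ fI M := by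
  intro fuel
  induction fuel with
  | zero => intro m hm h; exact ⟨m, le_refl m, rfl, h⟩
  | succ fuel ih =>
    intro m hm h
    obtain ⟨j, rfl⟩ := Nat.exists_eq_add_of_le hm
    have hlast : pvLast (fibs (2 + j)) = fI (2 + j) := by
      have : 2 + j = (1 + j) + 1 := by omega
      rw [this]; exact pvLast_fibs _
    have hlast2 : pvLast2 (fibs (2 + j)) = fI (1 + j) := by
      have h1 : 2 + j = j + 2 := by omega
      have h2 : 1 + j = j + 1 := by omega
      rw [h1, h2]; exact pvLast2_fibs _
    rw [extendFib]
    by_cases hc : pvLast (fibs (2 + j)) < n * 2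
    · rw [if_pos hc]
      have happ : fibs (2 + j) ++ [pvLast (fibs (2 + j)) + pvLast2 (fibs (2 + j))]
          = fibs (2 + j + 1) := by
        rw [hlast, hlast2]
        have hrec : fI (2 + j + 1) = fI (1 + j) + fI (2 + j) := by
          have e1 : 2 + j + 1 = (1 + j) + 2 := by omega
          have e2 : 2 + j = (1 + j) + 1 := by omega
          rw [e1, e2]; exact fI_add_two (1 + j)
        rw [fibs, hrec]
        ring_nf
      rw [happ]
      obtain ⟨M, hM1, hM2, hM3⟩ := ih (2 + j + 1) (by omega)
        (by have : 2 + j + 1 + fuel = 2 + j + (fuel + 1) := by omega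
            rw [this]; exact h)
      exact ⟨M, by omega, hM2, hM3⟩
    · rw [if_neg hc]
      rw [hlast] at hc
      exact ⟨2 + j, le_refl _, rfl, by omega⟩

theorem bracket_spec (n : Int) :
    ∀ (fuel k : Nat), 1 ≤ k → (∀ i, 1 ≤ i → i < k + 1 → fI i < n) → n ≤ fI (k + 1 + fuel) →
      ∃ J, k + 1 ≤ J ∧ bracket n fuel (fI k) (fI (k + 1)) = (fI (J - 1), fI J) ∧
        n ≤ fI J ∧ ∀ i, 1 ≤ i → i < J → fI i < n := by
  intro fuel
  induction fuel with
  | zero =>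
    intro k hk hlt h
    exact ⟨k + 1, le_refl _, by simp [bracket], h, hlt⟩
  | succ fuel ih =>
    intro k hk hlt h
    rw [bracket]
    by_cases hc : fI (k + 1) < n
    · rw [if_pos hc]
      have hrec : fI k + fI (k + 1) = fI (k + 1 + 1) := (fI_add_two k).symm
      rw [hrec]
      obtain ⟨J, hJ1, hJ2, hJ3, hJ4⟩ := ih (k + 1) (by omega)
        (by intro i hi1 hi2
            rcases Nat.lt_or_ge i (k + 1) with h' | h'
            · exact hlt i hi1 h'
            · have : i = k + 1 := by omega
              subst this; exact hc)
        (by have : k + 1 + 1 + fuel = k + 1 + (fuel + 1) := by omega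
            rw [this]; exact h)
      exact ⟨J, by omega, hJ2, hJ3, hJ4⟩
    · rw [if_neg hc]
      exact ⟨k + 1, le_refl _, by simp, by omega, hlt⟩

theorem scan_below (n : Int) (J : Nat) (hJ : ∀ i, 1 ≤ i → i < J → fI i < n) :
    ∀ j, 1 ≤ j → j < J → List.foldl (scanStep n) (1, n - 1) (fibs j) = (fI j, n - fI j) := by
  intro j
  induction j with
  | zero => omega
  | succ j ih =>
    intro _ hj
    rcases Nat.eq_zero_or_pos j with rfl | hjpos
    · have h1 : (1 : Int) < n := hJ 1 (by omega) (by omega)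
      show List.foldl (scanStep n) (1, n - 1) [fI 1] = (fI 1, n - fI 1)
      have : fI 1 = 1 := rfl
      simp only [List.foldl, scanStep, this]
      rw [abs_of_nonneg (by omega), if_neg (by omega)]
    · rw [fibs, List.foldl_append, ih hjpos (by omega)]
      have hlt : fI (j + 1) < n := hJ (j + 1) (by omega) hj
      show scanStep n (fI j, n - fI j) (fI (j + 1)) = (fI (j + 1), n - fI (j + 1))
      rw [scanStep, abs_of_nonneg (by omega)]
      rcases Nat.lt_or_ge j 2 with hj2 | hj2
      · have hj1 : j = 1 := by omega
        subst hj1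
        have e : fI (1 + 1) = fI 1 := by decide
        rw [e]; simp
      · have : fI j < fI (j + 1) := fI_lt_succ hj2
        rw [if_pos (by omega)]

theorem scan_main (n : Int) (J M : Nat) (hJ3 : 3 ≤ J)
    (hJlt : ∀ i, 1 ≤ i → i < J → fI i < n) (hJge : n ≤ fI J) (hJM : J ≤ M) :
    (List.foldl (scanStep n) (1, n - 1) (fibs M)).1
      = if n - fI (J - 1) ≤ fI J - n then fI (J - 1) else fI J := by
  have hstep1 : List.foldl (scanStep n) (1, n - 1) (fibs J)
      = if fI J - n < n - fI (J - 1) then (fI J, fI J - n) else (fI (J - 1), n - fI (J - 1)) := by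
    obtain ⟨j, rfl⟩ := Nat.exists_eq_add_of_le hJ3
    have e1 : 3 + j = (j + 2) + 1 := by omega
    rw [e1] at hJlt hJge
    rw [e1, fibs, List.foldl_append,
      scan_below n ((j + 2) + 1) hJlt (j + 2) (by omega) (by omega)]
    have habs : |n - fI (j + 2 + 1)| = fI (j + 2 + 1) - n := by
      rw [abs_sub_comm]
      exact abs_of_nonneg (by omega)
    show scanStep n (fI (j + 2), n - fI (j + 2)) (fI (j + 2 + 1)) = _
    rw [scanStep, habs]
    have e2 : (j + 2 + 1) - 1 = j + 2 := by omega
    rw [e2]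
  have habove : ∀ m, J ≤ m → List.foldl (scanStep n) (1, n - 1) (fibs m)
      = if fI J - n < n - fI (J - 1) then (fI J, fI J - n) else (fI (J - 1), n - fI (J - 1)) := by
    intro m hm
    induction m, hm using Nat.le_induction with
    | base => exact hstep1
    | succ m hm ih =>
      rw [fibs, List.foldl_append, ih]
      have hbig : fI J < fI (m + 1) := fI_strict (by omega) (by omega)
      have habs : |n - fI (m + 1)| = fI (m + 1) - n := by
        rw [abs_sub_comm]; exact abs_of_nonneg (by omega)
      have haJ : fI (J - 1) < n := hJlt (J - 1) (by omega) (by omega)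
      by_cases hc : fI J - n < n - fI (J - 1)
      · rw [if_pos hc]
        show scanStep n (fI J, fI J - n) (fI (m + 1)) = _
        rw [scanStep, habs, if_neg (by omega)]
      · rw [if_neg hc]
        show scanStep n (fI (J - 1), n - fI (J - 1)) (fI (m + 1)) = _
        rw [scanStep, habs, if_neg (by omega)]
  rw [habove M hJM]
  split_ifs <;> first | rfl | omega

theorem fI_one : fI 1 = 1 := rfl
theorem fI_two : fI 2 = 1 := rfl

theorem closest_fibonacci_spec : Claim_equal_closest_fibonacci := by
  intro n hdom
  unfold Spec_closest_fibonacci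
  by_cases hneg : n ≤ 0
  · simp [closest_fibonacci, closest_fibonacci_alt, hneg]
  · by_cases h1 : n = 1
    · subst h1; decide
    have hn2 : 2 ≤ n := by omega
    have hdom' : n ≤ 2147483648 := by
      unfold Dom_closest_fibonacci pvDomInt at hdom
      simp only [decide_eq_true_eq] at hdom
      omega
    have hfib102 : (2147483648 : Int) ≤ fI 102 := by decide
    have hfib112 : (2147483648 : Int) * 2 ≤ fI 112 := by decide
    obtain ⟨J, hJ2, hbr, hJge, hJlt⟩ := bracket_spec n 100 1 (le_refl 1)
      (by intro i hi1 hi2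
          have : i = 1 := by omega
          subst this; rw [fI_one]; omega)
      (by show n ≤ fI 102; omega)
    rw [fI_one, fI_two] at hbr
    have hJ3 : 3 ≤ J := by
      rcases Nat.lt_or_ge J 3 with h | h
      · have : J = 2 := by omega
        rw [this, fI_two] at hJge; omega
      · exact h
    obtain ⟨M, hM12, hext, hMge⟩ := extend_spec n 100 12 (by omega) (by show n * 2 ≤ fI 112; omega)
    have hJM : J ≤ M := by
      by_contra h
      have := hJlt M (by omega) (by omega)
      omega
    simp only [closest_fibonacci, closest_fibonacci_alt, if_neg (show ¬ n ≤ 0 by omega)]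
    rw [← fibs_twelve, hext, fibs_head M (by omega), hbr]
    simp only [Option.getD_some]
    rw [abs_of_nonneg (show (0 : Int) ≤ n - 1 by omega)]
    rw [scan_main n J M hJ3 hJlt hJge hJM]
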